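-- pv_equiv track=rewrite | github.com/Themis404/completed_tasks | task_ten.py | identificationEnd
-- ===== SOURCE A (Python) =====
-- def identificationEnd(email, countEnd):
--
--     afterPoint = len(email)
--
--     for i, letter in enumerate(email):
--
--         if letter == '.':
--             afterPoint = i
--
--         if i > afterPoint and letter.isalnum():
--             countEnd += 1
--
--     if countEnd == 3:
--         return True
--     else:
--         return False
-- ===== SOURCE B (Python) =====
-- def identificationEnd(email, countEnd):
--     need = 3 - countEnd
--     rest = iter(email)
--     for ch in rest:
--         if ch == '.':
--             break
--     else:
--         return need == 0
--     seen = 0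
--     for ch in rest:
--         if ch.isalnum():
--             seen += 1
--             if seen > need:
--                 return False
--     return seen == need
-- ===== Notes on version B (the rewrite author's own statement) =====
-- stated objective: alternative
-- what changed: Replaces A's single fused loop (tracking a moving last-dot index while unconditionally counting every alnum) with a staged decision procedure: one iterator is first consumed up to the first '.', then the remainder is scanned with an early exit as soon as the count of alphanumerics exceeds the needed 3 - countEnd, so the full count is never computed.
import Mathlib
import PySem

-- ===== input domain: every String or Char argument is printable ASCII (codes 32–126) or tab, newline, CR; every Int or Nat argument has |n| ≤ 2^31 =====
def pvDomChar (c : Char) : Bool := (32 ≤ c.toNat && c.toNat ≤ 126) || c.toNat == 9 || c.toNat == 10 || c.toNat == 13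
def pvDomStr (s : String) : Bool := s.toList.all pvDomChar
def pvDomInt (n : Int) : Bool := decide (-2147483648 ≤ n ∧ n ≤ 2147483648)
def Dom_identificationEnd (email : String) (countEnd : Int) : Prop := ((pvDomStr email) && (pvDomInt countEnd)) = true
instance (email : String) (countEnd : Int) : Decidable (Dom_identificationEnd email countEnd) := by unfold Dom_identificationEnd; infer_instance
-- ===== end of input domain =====

-- B replaces A's fused enumerate loop (moving last-dot index + full alphanumeric count) with two staged
-- consumptions of one iterator: skip to the first '.', then decide by counting with an early exit once the
-- needed count (3 - countEnd) is exceeded; objective: alternative (early-terminating decision procedure).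


-- ===== PORT A =====
-- loop body: 'if letter == '.': afterPoint = i' then 'if i > afterPoint and letter.isalnum(): countEnd += 1'
def identificationEndStep (st : Int × Int) (p : Int × Char) : Int × Int :=
  let afterPoint := if p.2 == '.' then p.1 else st.1
  let countEnd := if p.1 > afterPoint ∧ PySem.Chars.isalnum p.2 then st.2 + 1 else st.2
  (afterPoint, countEnd)

def identificationEnd (email : String) (countEnd : Int) : Bool :=
  let afterPoint : Int := (PySem.Str.len email : Int)
  let st := (PySem.List.enumerate email.toList 0).foldl identificationEndStep (afterPoint, countEnd)
  if st.2 = 3 then true else false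

-- ===== PORT B =====
-- first for-loop over the iterator: break at the first '.', else-branch signalled by 'none'
def identificationEndSkip : List Char → Option (List Char)
  | [] => none
  | c :: rest => if c == '.' then some rest else identificationEndSkip rest

-- second for-loop over the remaining iterator: count alnum, early 'return False' once seen > need
def identificationEndScan (need : Int) : List Char → Int → Bool
  | [], seen => decide (seen = need)
  | c :: rest, seen =>
    if PySem.Chars.isalnum c then
      if seen + 1 > need then false
      else identificationEndScan need rest (seen + 1)
    else identificationEndScan need rest seen

def identificationEnd_alt (email : String) (countEnd : Int) : Bool :=
  let need := 3 - countEnd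
  match identificationEndSkip email.toList with
  | none => decide (need = 0)
  | some rest => identificationEndScan need rest 0

-- ===== PRECONDITION & SPEC =====
def Spec_identificationEnd (email : String) (countEnd : Int) (out : Bool) : Prop := out = identificationEnd_alt email countEnd
instance (email : String) (countEnd : Int) (out : Bool) : Decidable (Spec_identificationEnd email countEnd out) := by unfold Spec_identificationEnd; infer_instance

-- ===== CLAIM (what is proved, stated in full; the proofs are below) =====
def Claim_equal_identificationEnd : Prop := ∀ (email : String) (countEnd : Int), Dom_identificationEnd email countEnd → Spec_identificationEnd email countEnd (identificationEnd email countEnd)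

-- ===== LEMMAS AND PROOFS =====

-- weight of one character in the alphanumeric count
def indAlnum (c : Char) : Int := if PySem.Chars.isalnum c then (1 : Int) else 0

theorem indAlnum_nonneg (c : Char) : 0 ≤ indAlnum c := by
  unfold indAlnum; split <;> omega

theorem cnt_nonneg (l : List Char) : 0 ≤ (l.map indAlnum).sum := by
  induction l with
  | nil => simp
  | cons x xs ih => simpa using add_nonneg (indAlnum_nonneg x) ih

-- A's loop after a dot has been seen (afterPoint < next index): every alnum char counts
theorem foldA_seen (l : List Char) (s ap c : Int) (h : ap < s) :
    ((PySem.List.enumerate l s).foldl identificationEndStep (ap, c)).2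
      = c + (l.map indAlnum).sum := by
  induction l generalizing s ap c with
  | nil => simp [PySem.List.enumerate_nil]
  | cons x xs ih =>
    rw [PySem.List.enumerate_cons, List.foldl_cons]
    by_cases hx : x = '.'
    · subst hx
      have hstep : identificationEndStep (ap, c) (s, '.') = (s, c) := by
        simp [identificationEndStep]
      rw [hstep, ih (s + 1) s c (by omega)]
      have : indAlnum '.' = 0 := by decide
      simp [this]
    · have hstep : identificationEndStep (ap, c) (s, x) = (ap, c + indAlnum x) := by
        simp only [identificationEndStep, beq_iff_eq, if_neg hx, indAlnum]
        by_cases ha : PySem.Chars.isalnum x = true <;> simp [ha, h]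
      rw [hstep, ih (s + 1) ap (c + indAlnum x) (by omega)]
      simp; ring

-- A's whole loop computes countEnd plus the alnum count of what skip leaves
theorem foldA_skip (l : List Char) (s ap c : Int) (h : s + l.length ≤ ap) :
    ((PySem.List.enumerate l s).foldl identificationEndStep (ap, c)).2
      = c + (match identificationEndSkip l with
             | none => 0
             | some rest => (rest.map indAlnum).sum) := by
  induction l generalizing s c with
  | nil => simp [PySem.List.enumerate_nil, identificationEndSkip]
  | cons x xs ih =>
    rw [PySem.List.enumerate_cons, List.foldl_cons]
    by_cases hx : x = '.'
    · subst hx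
      have hstep : identificationEndStep (ap, c) (s, '.') = (s, c) := by
        simp [identificationEndStep]
      rw [hstep, foldA_seen xs (s + 1) s c (by omega)]
      simp [identificationEndSkip]
    · have hstep : identificationEndStep (ap, c) (s, x) = (ap, c) := by
        simp only [identificationEndStep, beq_iff_eq, if_neg hx]
        have : ¬ (s > ap) := by simp at h; omega
        simp [this]
      rw [hstep, ih (s + 1) c (by simp at h ⊢; omega)]
      simp [identificationEndSkip, hx]

-- B's scan with cutoff decides 'seen + full count = need'
theorem scan_eq (need : Int) (l : List Char) (seen : Int) :
    identificationEndScan need l seen = decide (seen + (l.map indAlnum).sum = need) := by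
  induction l generalizing seen with
  | nil => simp [identificationEndScan]
  | cons x xs ih =>
    by_cases hx : PySem.Chars.isalnum x = true
    · rw [identificationEndScan, if_pos hx]
      by_cases hcut : seen + 1 > need
      · rw [if_pos hcut]
        have hxs := cnt_nonneg xs
        rw [eq_comm, decide_eq_false_iff_not]
        simp only [List.map_cons, List.sum_cons, indAlnum, hx, if_true]
        omega
      · rw [if_neg hcut, ih (seen + 1)]
        have : seen + 1 + (xs.map indAlnum).sum = seen + ((x :: xs).map indAlnum).sum := by
          simp [indAlnum, hx]; ring
        rw [this]
    · rw [identificationEndScan, if_neg hx, ih seen]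
      have : seen + (xs.map indAlnum).sum = seen + ((x :: xs).map indAlnum).sum := by
        simp [indAlnum, hx]
      rw [this]

theorem identificationEnd_spec : Claim_equal_identificationEnd := by
  intro email countEnd _
  unfold Spec_identificationEnd identificationEnd identificationEnd_alt
  dsimp only
  have hlen : PySem.Str.len email = (email.toList.length : Int) := by
    simp [PySem.Str.len]
  rw [foldA_skip email.toList 0 (PySem.Str.len email) countEnd (by rw [hlen]; omega)]
  cases hsk : identificationEndSkip email.toList with
  | none =>
    dsimp only
    by_cases hc : countEnd = 3 <;> simp [hc] <;> omega
  | some rest =>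
    dsimp only
    rw [scan_eq]
    by_cases hc : countEnd + (rest.map indAlnum).sum = 3
    · rw [if_pos hc, eq_comm, decide_eq_true_eq]; omega
    · rw [if_neg hc, eq_comm, decide_eq_false_iff_not]; omega
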